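-- pv_equiv track=rewrite | github.com/linhdvu14/cp-sols | sols/Google/KickStart/2022/2022_E/B_Students_and_Mentors.py | solve
-- ===== SOURCE A (Python) =====
-- from bisect import bisect_right
--
-- def solve(N, A):
--     idx = sorted(list(range(N)), key=lambda i: A[i])
--     B = [A[i] for i in idx]
--
--     res = [-1] * N
--     for j in range(N):
--         i = bisect_right(B, 2 * A[j]) - 1
--         if idx[i] != j: res[j] = B[i]
--         elif i > 0: res[j] = B[i - 1]
--
--     return res
-- ===== SOURCE B (Python) =====
-- def solve(N, A):
--     # One merged ascending sweep: a single monotone pointer p replaces the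
--     # per-student binary search of the original.
--     idx = sorted(range(N), key=lambda i: A[i])
--     B = [A[i] for i in idx]
--
--     res = [-1] * N
--     p = -1
--     for j in idx:
--         while p + 1 < N and B[p + 1] <= 2 * A[j]:
--             p += 1
--         if idx[p] != j:
--             res[j] = B[p]
--         elif p > 0:
--             res[j] = B[p - 1]
--     return res
-- ===== Notes on version B (the rewrite author's own statement) =====
-- stated objective: alternative
-- what changed: B replaces A's per-student bisect_right binary search with a single monotone pointer swept once over the students in ascending-rating order (the sort is kept; the pointer advances only forward because 2*A[j] is non-decreasing along that order).
-- outside the precondition, e.g. on solve(2, [5]): A raises IndexError, B raises IndexError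
import Mathlib
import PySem

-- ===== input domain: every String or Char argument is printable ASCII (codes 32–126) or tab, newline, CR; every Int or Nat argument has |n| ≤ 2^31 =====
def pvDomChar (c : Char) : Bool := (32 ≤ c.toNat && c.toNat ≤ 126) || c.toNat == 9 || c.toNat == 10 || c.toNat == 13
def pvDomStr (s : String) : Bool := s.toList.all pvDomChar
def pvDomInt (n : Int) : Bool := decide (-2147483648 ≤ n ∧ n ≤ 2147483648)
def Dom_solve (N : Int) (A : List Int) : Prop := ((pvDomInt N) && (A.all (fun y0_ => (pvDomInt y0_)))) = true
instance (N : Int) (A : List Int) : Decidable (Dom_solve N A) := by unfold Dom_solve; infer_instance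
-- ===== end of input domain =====

-- B replaces A's per-student binary search by one monotone pointer sweep over the
-- ascending-rating order (alternative decomposition; return values proved identical).

-- ===== PORT A =====
-- pyGetD defaults are never reached under Pre_solve: every index is in Python range
-- (0 ≤ j < N ≤ len A; i = bisect_right-1 satisfies -1 ≤ i < N, -1 wraps as in Python).
def solve (N : Int) (A : List Int) : List Int :=
  let idx := PySem.List.sorted (PySem.List.pyRange 0 N 1) (fun i => PySem.List.pyGetD A i 0)
  let B := idx.map (fun i => PySem.List.pyGetD A i 0)
  (PySem.List.pyRange 0 N 1).foldl
    (fun res j =>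
      let i : Int := (PySem.List.bisectRight B (2 * PySem.List.pyGetD A j 0) : Int) - 1
      if PySem.List.pyGetD idx i 0 ≠ j then res.set j.toNat (PySem.List.pyGetD B i 0)
      else if 0 < i then res.set j.toNat (PySem.List.pyGetD B (i - 1) 0)
      else res)
    (List.replicate N.toNat (-1))

-- ===== PORT B =====
-- the `while p + 1 < N and B[p+1] <= 2*A[j]: p += 1` loop of Source B
def pvAdvance (B : List Int) (N t p : Int) : Int :=
  if h : p + 1 < N ∧ PySem.List.pyGetD B (p + 1) 0 ≤ t then pvAdvance B N t (p + 1) else p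
termination_by (N - p).toNat
decreasing_by obtain ⟨h1, -⟩ := h; omega

def solve_alt (N : Int) (A : List Int) : List Int :=
  let idx := PySem.List.sorted (PySem.List.pyRange 0 N 1) (fun i => PySem.List.pyGetD A i 0)
  let B := idx.map (fun i => PySem.List.pyGetD A i 0)
  (idx.foldl
    (fun (st : List Int × Int) j =>
      let p := pvAdvance B N (2 * PySem.List.pyGetD A j 0) st.2
      (if PySem.List.pyGetD idx p 0 ≠ j then st.1.set j.toNat (PySem.List.pyGetD B p 0)
       else if 0 < p then st.1.set j.toNat (PySem.List.pyGetD B (p - 1) 0)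
       else st.1, p))
    (List.replicate N.toNat (-1), -1)).1

-- ===== PRECONDITION & SPEC =====
-- Pre_solve excludes exactly the inputs where Python A raises IndexError
-- (the sort key evaluates A[i] for i in range(N), so N > len(A) raises).
def Pre_solve (N : Int) (A : List Int) : Prop := N ≤ (A.length : Int)
instance (N : Int) (A : List Int) : Decidable (Pre_solve N A) := by unfold Pre_solve; infer_instance
def pvWitness_solve : Int × List Int := (2, [1, 3])
def Spec_solve (N : Int) (A : List Int) (out : List Int) : Prop := out = solve_alt N A
instance (N : Int) (A : List Int) (out : List Int) : Decidable (Spec_solve N A out) := by unfold Spec_solve; infer_instance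

-- ===== CLAIM (what is proved, stated in full; the proofs are below) =====
def Claim_equal_solve : Prop := ∀ (N : Int) (A : List Int), Dom_solve N A → Pre_solve N A → Spec_solve N A (solve N A)

-- ===== LEMMAS AND PROOFS =====

-- A's per-j loop body, with idx and B abstracted out
def pvStepA (A idx B : List Int) (res : List Int) (j : Int) : List Int :=
  let i : Int := (PySem.List.bisectRight B (2 * PySem.List.pyGetD A j 0) : Int) - 1
  if PySem.List.pyGetD idx i 0 ≠ j then res.set j.toNat (PySem.List.pyGetD B i 0)
  else if 0 < i then res.set j.toNat (PySem.List.pyGetD B (i - 1) 0)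
  else res

-- B's per-j loop body
def pvStepB (A idx B : List Int) (N : Int) (st : List Int × Int) (j : Int) : List Int × Int :=
  let p := pvAdvance B N (2 * PySem.List.pyGetD A j 0) st.2
  (if PySem.List.pyGetD idx p 0 ≠ j then st.1.set j.toNat (PySem.List.pyGetD B p 0)
   else if 0 < p then st.1.set j.toNat (PySem.List.pyGetD B (p - 1) 0)
   else st.1, p)

theorem solve_unfold (N : Int) (A : List Int) :
    solve N A =
      (PySem.List.pyRange 0 N 1).foldl
        (pvStepA A (PySem.List.sorted (PySem.List.pyRange 0 N 1) (fun i => PySem.List.pyGetD A i 0))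
          ((PySem.List.sorted (PySem.List.pyRange 0 N 1) (fun i => PySem.List.pyGetD A i 0)).map
            (fun i => PySem.List.pyGetD A i 0)))
        (List.replicate N.toNat (-1)) := rfl

theorem solve_alt_unfold (N : Int) (A : List Int) :
    solve_alt N A =
      ((PySem.List.sorted (PySem.List.pyRange 0 N 1) (fun i => PySem.List.pyGetD A i 0)).foldl
        (pvStepB A (PySem.List.sorted (PySem.List.pyRange 0 N 1) (fun i => PySem.List.pyGetD A i 0))
          ((PySem.List.sorted (PySem.List.pyRange 0 N 1) (fun i => PySem.List.pyGetD A i 0)).map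
            (fun i => PySem.List.pyGetD A i 0)) N)
        (List.replicate N.toNat (-1), -1)).1 := rfl

theorem pvBisect_mono (B : List Int) (t t' : Int)
    (hs : List.Pairwise (fun a b => a ≤ b) B) (h : t ≤ t') :
    PySem.List.bisectRight B t ≤ PySem.List.bisectRight B t' := by
  obtain ⟨hle, hlt, hgt⟩ := PySem.List.bisectRight_spec B t hs
  obtain ⟨hle', hlt', hgt'⟩ := PySem.List.bisectRight_spec B t' hs
  by_contra hc
  push Not at hc
  have hj : PySem.List.bisectRight B t' < B.length := lt_of_lt_of_le hc hle
  have h1 := hlt _ hj hc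
  have h2 := hgt' _ hj (le_refl _)
  omega

theorem pvAdvance_eq (B : List Int) (N t : Int) (hN : N = (B.length : Int))
    (hs : List.Pairwise (fun a b => a ≤ b) B) :
    ∀ (k : Nat) (p : Int), -1 ≤ p →
      p ≤ (PySem.List.bisectRight B t : Int) - 1 →
      ((PySem.List.bisectRight B t : Int) - 1 - p).toNat = k →
      pvAdvance B N t p = (PySem.List.bisectRight B t : Int) - 1 := by
  obtain ⟨hle, hlt, hgt⟩ := PySem.List.bisectRight_spec B t hs
  intro k
  induction k with
  | zero =>
    intro p hp1 hp2 hk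
    have hpe : p = (PySem.List.bisectRight B t : Int) - 1 := by omega
    rw [pvAdvance, dif_neg, hpe]
    rintro ⟨h1, h2⟩
    have hlen : p + 1 < (B.length : Int) := by omega
    have hnn : (0 : Int) ≤ p + 1 := by omega
    have hget : PySem.List.pyGetD B (p + 1) 0 = B[(p + 1).toNat] :=
      PySem.List.pyGetD_eq_getElem B 0 hnn hlen
    have hidx : PySem.List.bisectRight B t ≤ (p + 1).toNat := by omega
    have := hgt (p + 1).toNat (by omega) hidx
    rw [hget] at h2
    omega
  | succ k ih =>
    intro p hp1 hp2 hk
    have hplt : p + 1 ≤ (PySem.List.bisectRight B t : Int) - 1 := by omega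
    have hlen : p + 1 < (B.length : Int) := by omega
    have hnn : (0 : Int) ≤ p + 1 := by omega
    have hget : PySem.List.pyGetD B (p + 1) 0 = B[(p + 1).toNat] :=
      PySem.List.pyGetD_eq_getElem B 0 hnn hlen
    have hcond : PySem.List.pyGetD B (p + 1) 0 ≤ t := by
      rw [hget]
      exact hlt (p + 1).toNat (by omega) (by omega)
    rw [pvAdvance, dif_pos ⟨by omega, hcond⟩]
    exact ih (p + 1) (by omega) hplt (by omega)

theorem pvFold_eq (A idx B : List Int) (N : Int) (hN : N = (B.length : Int))
    (hs : List.Pairwise (fun a b => a ≤ b) B) :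
    ∀ (l : List Int) (res : List Int) (p : Int),
      List.Pairwise (fun a b => PySem.List.pyGetD A a 0 ≤ PySem.List.pyGetD A b 0) l →
      -1 ≤ p →
      (∀ j ∈ l, p ≤ (PySem.List.bisectRight B (2 * PySem.List.pyGetD A j 0) : Int) - 1) →
      (l.foldl (pvStepB A idx B N) (res, p)).1 = l.foldl (pvStepA A idx B) res := by
  intro l
  induction l with
  | nil => intro res p _ _ _; rfl
  | cons j l' ih =>
    intro res p hmono hp1 hp2
    have hadv : pvAdvance B N (2 * PySem.List.pyGetD A j 0) p =
        (PySem.List.bisectRight B (2 * PySem.List.pyGetD A j 0) : Int) - 1 :=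
      pvAdvance_eq B N _ hN hs _ p hp1 (hp2 j (List.mem_cons_self)) rfl
    have hstep : pvStepB A idx B N (res, p) j =
        (pvStepA A idx B res j, (PySem.List.bisectRight B (2 * PySem.List.pyGetD A j 0) : Int) - 1) := by
      simp only [pvStepB, pvStepA, hadv]
    rw [List.foldl_cons, List.foldl_cons, hstep]
    exact ih _ _ hmono.of_cons (by omega)
      (fun j' hj' => by
        have hkey : PySem.List.pyGetD A j 0 ≤ PySem.List.pyGetD A j' 0 :=
          (List.pairwise_cons.mp hmono).1 j' hj'
        have := pvBisect_mono B (2 * PySem.List.pyGetD A j 0) (2 * PySem.List.pyGetD A j' 0) hs (by omega)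
        omega)

theorem pvStepA_comm (A idx B : List Int) (N : Int) :
    ∀ x ∈ PySem.List.pyRange 0 N 1, ∀ y ∈ PySem.List.pyRange 0 N 1, ∀ z,
      pvStepA A idx B (pvStepA A idx B z x) y = pvStepA A idx B (pvStepA A idx B z y) x := by
  intro x hx y hy z
  by_cases hxy : x = y
  · subst hxy; rfl
  · have hx' := (PySem.List.mem_pyRange_one).mp hx
    have hy' := (PySem.List.mem_pyRange_one).mp hy
    have hne : x.toNat ≠ y.toNat := by omega
    simp only [pvStepA]
    split_ifs <;> first
      | rfl
      | exact List.set_comm _ _ hne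

-- ===== VERDICT (by name: the statement is the Claim_ definition above) =====
theorem solve_spec : Claim_equal_solve := by
  intro N A _ _
  unfold Spec_solve
  by_cases hN : N < 0
  · have hr : PySem.List.pyRange 0 N 1 = [] := PySem.List.pyRange_one_eq_nil (by omega)
    rw [solve_unfold, solve_alt_unfold, hr]
    have hsnil : PySem.List.sorted ([] : List Int) (fun i => PySem.List.pyGetD A i 0) = [] :=
      List.Perm.eq_nil (PySem.List.sorted_perm _ _ _)
    simp [hsnil]
  · push Not at hN
    set key : Int → Int := fun i => PySem.List.pyGetD A i 0 with hkey
    set idx := PySem.List.sorted (PySem.List.pyRange 0 N 1) key with hidx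
    set B := idx.map key with hB
    have hperm : idx.Perm (PySem.List.pyRange 0 N 1) := PySem.List.sorted_perm _ _ _
    have hlenidx : idx.length = (PySem.List.pyRange 0 N 1).length := hperm.length_eq
    have hlenB : (B.length : Int) = N := by
      rw [hB, List.length_map, hlenidx, PySem.List.length_pyRange_one]
      omega
    have hsB : List.Pairwise (fun a b => a ≤ b) B := by
      rw [hB]
      exact PySem.List.sorted_map_key_pairwise _ _
    have hmono : List.Pairwise (fun a b => key a ≤ key b) idx :=
      PySem.List.sorted_pairwise _ _
    rw [solve_unfold, solve_alt_unfold]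
    rw [pvFold_eq A idx B N hlenB.symm hsB idx (List.replicate N.toNat (-1)) (-1) hmono
      (by omega) (fun j _ => by omega)]
    exact (hperm.foldl_eq' (pvStepA_comm A idx B N |> fun h x hx y hy z =>
      h x (hperm.mem_iff.mp hx) y (hperm.mem_iff.mp hy) z) _).symm
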